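-- pv_equiv track=rewrite | github.com/tknrych/treatysearcher | utils.py | unmask_list_markers
-- ===== SOURCE A (Python) =====
-- def unmask_list_markers(text: str) -> str:
--     """マスキングした文字列を元に戻す"""
--     replacements = {
--         '__PAREN_A__': '(a)', '__PAREN_B__': '(b)', '__PAREN_C__': '(c)',
--         '__PAREN_D__': '(d)', '__PAREN_E__': '(e)', '__PAREN_F__': '(f)',
--         '__PAREN_I__': '(i)', '__PAREN_II__': '(ii)', '__PAREN_III__': '(iii)',
--         '__PAREN_IV__': '(iv)',
--     }
--     for new, old in replacements.items():
--         text = text.replace(new, old)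
--     return text
-- ===== SOURCE B (Python) =====
-- SUFFIXES = ['III', 'IV', 'II', 'I', 'A', 'B', 'C', 'D', 'E', 'F']
--
-- def unmask_list_markers(text: str) -> str:
--     out = []
--     i = 0
--     while True:
--         j = text.find('__PAREN_', i)
--         if j == -1:
--             out.append(text[i:])
--             break
--         suf = None
--         for s in SUFFIXES:
--             if text.startswith(s + '__', j + 8):
--                 suf = s
--                 break
--         if suf is None:
--             out.append(text[i:j + 1])
--             i = j + 1
--         else:
--             out.append(text[i:j])
--             out.append('(' + suf.lower() + ')')
--             i = j + 10 + len(suf)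
--     return ''.join(out)
-- ===== Notes on version B (the rewrite author's own statement) =====
-- stated objective: alternative
-- what changed: Replaces A's ten sequential full-text str.replace passes by a single str.find-driven scan for the shared placeholder stem that classifies the following roman/letter suffix and emits its lowercase parenthesised marker directly, copying untouched stretches in slices.
-- outside the precondition, e.g. on unmask_list_markers('__PAREN_B__PAREN_A__'): A returns '__PAREN_B(a)', B returns '(b)PAREN_A__'
import Mathlib
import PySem

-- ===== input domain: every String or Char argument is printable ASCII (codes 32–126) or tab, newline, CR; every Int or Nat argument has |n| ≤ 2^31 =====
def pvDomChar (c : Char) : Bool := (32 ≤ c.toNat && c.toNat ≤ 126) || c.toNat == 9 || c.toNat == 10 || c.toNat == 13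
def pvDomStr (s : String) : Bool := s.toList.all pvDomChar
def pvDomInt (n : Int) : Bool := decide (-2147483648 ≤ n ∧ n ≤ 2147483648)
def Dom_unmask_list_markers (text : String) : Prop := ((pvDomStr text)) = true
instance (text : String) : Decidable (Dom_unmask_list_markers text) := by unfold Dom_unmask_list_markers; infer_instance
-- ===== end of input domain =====

-- B replaces A's ten sequential full-text replace passes by one find-driven scan for the common
-- placeholder stem that classifies the suffix and emits the marker (objective: alternative algorithm).

-- ===== PORT A =====
-- the replacements dict of A, in insertion order
def pvTable : List (String × String) :=
  [("__PAREN_A__", "(a)"), ("__PAREN_B__", "(b)"), ("__PAREN_C__", "(c)"),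
   ("__PAREN_D__", "(d)"), ("__PAREN_E__", "(e)"), ("__PAREN_F__", "(f)"),
   ("__PAREN_I__", "(i)"), ("__PAREN_II__", "(ii)"), ("__PAREN_III__", "(iii)"),
   ("__PAREN_IV__", "(iv)")]

-- A: for new, old in replacements.items(): text = text.replace(new, old)
def unmask_list_markers (text : String) : String :=
  pvTable.foldl (fun t p => PySem.Str.replace t p.1 p.2) text

-- ===== PORT B =====
-- Source B's SUFFIXES (probed in this order; matches are in fact mutually exclusive)
def pvSuffixes : List (List Char) :=
  [['I','I','I'], ['I','V'], ['I','I'], ['I'], ['A'], ['B'], ['C'], ['D'], ['E'], ['F']]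

-- the common eight-char stem shared by all placeholder tokens, which Source B str.find's
def pvStem : List Char := ['_', '_', 'P', 'A', 'R', 'E', 'N', '_']

-- Source B's marker: open paren, lowercased suffix, close paren
def pvMarker (s : List Char) : List Char := '(' :: (PySem.Chars.lower s ++ [')'])

-- needed by pvScan2's termination: a found stem occurrence lies inside the text
lemma pvFind_lt (l : List Char) (h : ¬ PySem.Chars.find l pvStem < 0) :
    (PySem.Chars.find l pvStem).toNat < l.length := by
  have h0 : 0 ≤ PySem.Chars.find l pvStem := by omega
  have hsp := (PySem.Chars.find_spec (s := l) (sub := pvStem) h0).1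
  have hlen : pvStem.length ≤ (l.drop (PySem.Chars.find l pvStem).toNat).length :=
    hsp.length_le
  rw [List.length_drop] at hlen
  have h8 : pvStem.length = 8 := rfl
  omega

-- Source B's while-loop over the remaining suffix: find the next stem occurrence, classify the suffix
-- (emit its marker) or copy one char past a failed stem; text.find(p, i) is find on the drop
def pvScan2 (l : List Char) : List Char :=
  if hj : PySem.Chars.find l pvStem < 0 then l
  else
    match pvSuffixes.find? (fun s =>
        (s ++ ['_', '_']).isPrefixOf (l.drop ((PySem.Chars.find l pvStem).toNat + 8))) with
    | some s =>
      l.take (PySem.Chars.find l pvStem).toNat ++ pvMarker s ++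
        pvScan2 ((l.drop ((PySem.Chars.find l pvStem).toNat + 8)).drop (s.length + 2))
    | none =>
      l.take ((PySem.Chars.find l pvStem).toNat + 1) ++
        pvScan2 (l.drop ((PySem.Chars.find l pvStem).toNat + 1))
termination_by l.length
decreasing_by
  · have := pvFind_lt l hj; simp only [List.length_drop]; omega
  · have := pvFind_lt l hj; simp only [List.length_drop]; omega

def unmask_list_markers_alt (text : String) : String :=
  String.ofList (pvScan2 text.toList)

-- ===== PRECONDITION & SPEC =====
-- the token→marker pairs of A on the character level (used by Pre_ and the proofs)
def pvCTable : List (List Char × List Char) :=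
  pvTable.map (fun p => (p.1.toList, p.2.toList))

-- Pre_ excludes texts in which occurrences of two DISTINCT placeholder tokens overlap (one token
-- starts strictly inside another's occurrence): there A's per-token sequential replacement order
-- and B's leftmost single-pass order give different, equally defensible results.
def Pre_unmask_list_markers (text : String) : Prop :=
  ∀ s ∈ text.toList.tails, ∀ p1 ∈ pvCTable, ∀ p2 ∈ pvCTable, p1 ≠ p2 →
    p1.1.isPrefixOf s = true → ∀ i ∈ List.range p1.1.length, 0 < i →
      ¬ (p2.1.isPrefixOf (List.drop i s) = true)
instance (text : String) : Decidable (Pre_unmask_list_markers text) := by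
  unfold Pre_unmask_list_markers; infer_instance

def pvWitness_unmask_list_markers : String := "a) __PAREN_II__ b"

def Spec_unmask_list_markers (text : String) (out : String) : Prop := out = unmask_list_markers_alt text
instance (text : String) (out : String) : Decidable (Spec_unmask_list_markers text out) := by unfold Spec_unmask_list_markers; infer_instance

-- ===== CLAIM (what is proved, stated in full; the proofs are below) =====
def Claim_equal_unmask_list_markers : Prop := ∀ (text : String), Dom_unmask_list_markers text → Pre_unmask_list_markers text → Spec_unmask_list_markers text (unmask_list_markers text)

-- ===== LEMMAS AND PROOFS =====

-- reference leftmost token scan: at each position emit the marker of the first matching token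
def pvScan (X : List Char) : List Char :=
  match X with
  | [] => []
  | c :: t =>
    match pvCTable.find? (fun p => p.1.isPrefixOf (c :: t)) with
    | some p => p.2 ++ pvScan (t.drop (p.1.length - 1))
    | none => c :: pvScan t
termination_by X.length
decreasing_by
  · simp only [List.length_drop, List.length_cons]; omega
  · simp only [List.length_cons]; omega

-- clean structural form of Python's str.replace for a nonempty pattern
def pvRep (old new : List Char) (l : List Char) : List Char :=
  match l with
  | [] => []
  | c :: t =>
    if old.isPrefixOf (c :: t) then new ++ pvRep old new (t.drop (old.length - 1))
    else c :: pvRep old new t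
termination_by l.length
decreasing_by
  · simp only [List.length_drop, List.length_cons]; omega
  · simp only [List.length_cons]; omega

-- all ten replace passes of A, on the character level
def pvApply (tbl : List (List Char × List Char)) (X : List Char) : List Char :=
  tbl.foldl (fun s p => pvRep p.1 p.2 s) X

-- global facts about the literal table
lemma pvTok_ne_nil : ∀ p ∈ pvCTable, p.1 ≠ [] := by decide
lemma pvRep_ne_nil : ∀ p ∈ pvCTable, p.2 ≠ [] := by decide
set_option maxRecDepth 4096 in
lemma pvChars_disjoint_b :
    (pvCTable.all fun p => pvCTable.all fun q => p.1.all fun c => !(q.2.contains c)) = true := by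
  decide
lemma pvChars_disjoint : ∀ p ∈ pvCTable, ∀ q ∈ pvCTable, ∀ c ∈ p.1, c ∉ q.2 := by
  have h := pvChars_disjoint_b
  simp only [List.all_eq_true, Bool.not_eq_true', List.contains_eq_mem,
    decide_eq_false_iff_not] at h
  exact h
-- PySem.Chars.replace with nonempty pattern is pvRep
lemma pvReplace_go_eq (old new : List Char) (hold : old ≠ []) :
    ∀ fuel l acc, l.length ≤ fuel →
      PySem.Chars.replace.go old new fuel l acc = acc.reverse ++ pvRep old new l := by
  intro fuel
  induction fuel with
  | zero =>
    intro l acc h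
    have hl : l = [] := by
      cases l with
      | nil => rfl
      | cons c t => simp at h
    subst hl
    rw [PySem.Chars.replace.go, pvRep]
  | succ n ih =>
    intro l acc h
    cases l with
    | nil =>
      rw [PySem.Chars.replace.go, pvRep]
      all_goals simp
    | cons c t =>
      obtain ⟨o, os, rfl⟩ : ∃ o os, old = o :: os := by
        cases old with
        | nil => exact absurd rfl hold
        | cons o os => exact ⟨o, os, rfl⟩
      rw [PySem.Chars.replace.go, pvRep]
      by_cases hp : (o :: os).isPrefixOf (c :: t) = true
      · rw [if_pos hp, if_pos hp]
        have hlen : (List.drop (o :: os).length (c :: t)).length ≤ n := by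
          simp only [List.length_drop, List.length_cons] at *
          omega
        rw [ih _ _ hlen]
        have hdrop : List.drop (o :: os).length (c :: t) = t.drop ((o :: os).length - 1) := by
          simp [List.length_cons]
        rw [hdrop]
        simp
      · rw [if_neg hp, if_neg hp]
        have hlen : t.length ≤ n := by
          simp only [List.length_cons] at h
          omega
        rw [ih _ _ hlen]
        simp

lemma pvReplace_eq (old new l : List Char) (hold : old ≠ []) :
    PySem.Chars.replace l old new = pvRep old new l := by
  rw [PySem.Chars.replace]
  have : old.isEmpty = false := by
    cases old with
    | nil => exact absurd rfl hold
    | cons o os => rfl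
  rw [this]
  simp only [Bool.false_eq_true, if_false]
  simpa using pvReplace_go_eq old new hold l.length l [] le_rfl

-- prefix transfer: a prefix made of non-replacement characters survives backwards through pvRep
lemma pvPrefix_transfer (old new : List Char) (hnew : new ≠ []) :
    ∀ (l u : List Char), (∀ c ∈ u, c ∉ new) → u <+: pvRep old new l → u <+: l := by
  intro l
  induction l using pvRep.induct (old := old) with
  | case1 =>
    intro u _ hu
    rw [pvRep] at hu
    rw [List.prefix_nil.mp hu]
  | case2 c t hp ih =>
    intro u hchars hu
    rw [pvRep, if_pos hp] at hu
    cases u with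
    | nil => exact List.nil_prefix
    | cons d u' =>
      obtain ⟨e, new', rfl⟩ : ∃ e new', new = e :: new' := by
        cases new with
        | nil => exact absurd rfl hnew
        | cons e new' => exact ⟨e, new', rfl⟩
      rw [List.cons_append, List.cons_prefix_cons] at hu
      exact absurd (hu.1 ▸ List.mem_cons_self) (hchars d List.mem_cons_self)
  | case3 c t hp ih =>
    intro u hchars hu
    rw [pvRep, if_neg hp] at hu
    cases u with
    | nil => exact List.nil_prefix
    | cons d u' =>
      rw [List.cons_prefix_cons] at hu ⊢
      refine ⟨hu.1, ih u' (fun x hx => hchars x (List.mem_cons_of_mem d hx)) hu.2⟩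

-- pvRep commutes with an untouched prefix
lemma pvRep_append (old new : List Char) :
    ∀ (t Y : List Char), (∀ i < t.length, ¬ old <+: (t.drop i ++ Y)) →
      pvRep old new (t ++ Y) = t ++ pvRep old new Y := by
  intro t
  induction t with
  | nil => intro Y _; simp
  | cons c t' ih =>
    intro Y h
    have h0 : ¬ old.isPrefixOf ((c :: t') ++ Y) = true := by
      rw [List.isPrefixOf_iff_prefix]
      simpa using h 0 (by simp)
    rw [List.cons_append, pvRep, if_neg (by simpa using h0)]
    rw [ih Y (fun i hi => by simpa using h (i + 1) (by simpa using hi))]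
    simp

-- decompose a prefix of an append
lemma pvPrefix_split {u a b : List Char} (h : u <+: a ++ b) :
    u <+: a ∨ ∃ v, u = a ++ v ∧ v <+: b := by
  induction a generalizing u with
  | nil => exact Or.inr ⟨u, by simp, by simpa using h⟩
  | cons x a' ih =>
    cases u with
    | nil => exact Or.inl List.nil_prefix
    | cons d u' =>
      rw [List.cons_append, List.cons_prefix_cons] at h
      rcases ih h.2 with hc | ⟨v, hv1, hv2⟩
      · exact Or.inl (List.cons_prefix_cons.mpr ⟨h.1, hc⟩)
      · exact Or.inr ⟨v, by rw [List.cons_append, h.1, hv1], hv2⟩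

-- all passes commute with an untouched prefix
lemma pvApply_append :
    ∀ (tbl : List (List Char × List Char)), (∀ p ∈ tbl, p ∈ pvCTable) →
    ∀ (t Y : List Char), (∀ p ∈ tbl, ∀ i < t.length, ¬ p.1 <+: (t.drop i ++ Y)) →
      pvApply tbl (t ++ Y) = t ++ pvApply tbl Y := by
  intro tbl
  induction tbl with
  | nil => intro _ t Y _; rfl
  | cons p tbl ih =>
    intro hsub t Y h
    have hp : p ∈ pvCTable := hsub p List.mem_cons_self
    have hsub' : ∀ q ∈ tbl, q ∈ pvCTable := fun q hq => hsub q (List.mem_cons_of_mem p hq)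
    have step1 : pvRep p.1 p.2 (t ++ Y) = t ++ pvRep p.1 p.2 Y :=
      pvRep_append p.1 p.2 t Y (h p List.mem_cons_self)
    have step2 : ∀ q ∈ tbl, ∀ i < t.length, ¬ q.1 <+: (t.drop i ++ pvRep p.1 p.2 Y) := by
      intro q hq i hi hpre
      have hq' : q ∈ pvCTable := hsub' q hq
      rcases pvPrefix_split hpre with hcase | ⟨v, hv1, hv2⟩
      · exact h q (List.mem_cons_of_mem p hq) i hi
          (hcase.trans (List.prefix_append _ _))
      · have hvch : ∀ c ∈ v, c ∉ p.2 := by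
          intro c hc
          exact pvChars_disjoint q hq' p hp c (hv1 ▸ List.mem_append_right _ hc)
        have hvY : v <+: Y :=
          pvPrefix_transfer p.1 p.2 (pvRep_ne_nil p hp) Y v hvch hv2
        obtain ⟨w, rfl⟩ := hvY
        refine h q (List.mem_cons_of_mem p hq) i hi ?_
        exact ⟨w, by rw [← List.append_assoc, ← hv1]⟩
    show pvApply tbl (pvRep p.1 p.2 (t ++ Y)) = t ++ pvApply tbl (pvRep p.1 p.2 Y)
    rw [step1, ih hsub' t (pvRep p.1 p.2 Y) step2]

lemma pvRep_head_match (old new Z : List Char) (hold : old ≠ []) :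
    pvRep old new (old ++ Z) = new ++ pvRep old new Z := by
  obtain ⟨o, os, rfl⟩ : ∃ o os, old = o :: os := by
    cases old with
    | nil => exact absurd rfl hold
    | cons o os => exact ⟨o, os, rfl⟩
  rw [List.cons_append, pvRep,
    if_pos (List.isPrefixOf_iff_prefix.mpr (by exact List.prefix_append _ _))]
  congr 1
  congr 1
  simp [List.length_cons]

lemma pvApply_nil : ∀ (tbl : List (List Char × List Char)), pvApply tbl [] = [] := by
  intro tbl
  induction tbl with
  | nil => rfl
  | cons p tbl ih =>
    show pvApply tbl (pvRep p.1 p.2 []) = []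
    rw [pvRep]; exact ih

-- character-level precondition, in suffix form
def pvPre (X : List Char) : Prop :=
  ∀ s, s <:+ X → ∀ p1 ∈ pvCTable, ∀ p2 ∈ pvCTable, p1 ≠ p2 →
    p1.1 <+: s → ∀ i, 0 < i → i < p1.1.length → ¬ p2.1 <+: (List.drop i s)

lemma pvPre_suffix {X s : List Char} (h : pvPre X) (hs : s <:+ X) : pvPre s := by
  intro s' hs'
  exact h s' (hs'.trans hs)

-- the foldl of pvApply split at a table decomposition
lemma pvApply_decomp (l1 l2 : List (List Char × List Char)) (p : List Char × List Char)
    (X : List Char) :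
    pvApply (l1 ++ p :: l2) X = pvApply l2 (pvRep p.1 p.2 (pvApply l1 X)) := by
  simp [pvApply, List.foldl_append]

-- main character-level equivalence: the leftmost scan is A's ten passes, under pvPre
lemma pvMain : ∀ X, pvPre X → pvScan X = pvApply pvCTable X := by
  intro X
  induction X using pvScan.induct with
  | case1 => intro _; rw [pvScan, pvApply_nil]
  | case2 c t p hfind ih =>
    intro hPre
    obtain ⟨hpb, l1, l2, htbl, hnone⟩ := List.find?_eq_some_iff_append.mp hfind
    have hp : p ∈ pvCTable := List.mem_of_find?_eq_some hfind
    have hpre : p.1 <+: (c :: t) := List.isPrefixOf_iff_prefix.mp hpb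
    obtain ⟨Y, hY⟩ := List.isPrefixOf_iff_prefix.mp hpb
    have hpne : p.1 ≠ [] := pvTok_ne_nil p hp
    have hYdrop : t.drop (p.1.length - 1) = Y := by
      obtain ⟨d, rest, hd⟩ : ∃ d rest, p.1 = d :: rest := by
        cases hq : p.1 with
        | nil => exact absurd hq hpne
        | cons d rest => exact ⟨d, rest, rfl⟩
      rw [hd, List.cons_append] at hY
      injection hY with h1 h2
      rw [← h2, hd]
      simp [List.length_cons]
    have hsub1 : ∀ q ∈ l1, q ∈ pvCTable := by
      intro q hq; rw [htbl]; exact List.mem_append_left _ hq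
    have hsub2 : ∀ q ∈ l2, q ∈ pvCTable := by
      intro q hq; rw [htbl]; exact List.mem_append_right _ (List.mem_cons_of_mem p hq)
    have hnone' : ∀ q ∈ l1, ¬ q.1 <+: (c :: t) := by
      intro q hq hqp
      have h1 := hnone q hq
      have h2 := List.isPrefixOf_iff_prefix.mpr hqp
      rw [h2] at h1
      simp at h1
    have hA1 : pvApply l1 (c :: t) = p.1 ++ pvApply l1 Y := by
      rw [← hY]
      refine pvApply_append l1 hsub1 p.1 Y ?_
      intro q hq i hi hqpre
      rcases Nat.eq_zero_or_pos i with rfl | hipos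
      · refine hnone' q hq ?_
        rw [← hY]
        simpa using hqpre
      · have hqne : q ≠ p := by
          intro hqeq
          exact hnone' q hq (hqeq ▸ hpre)
        have hdropX : List.drop i (c :: t) = p.1.drop i ++ Y := by
          rw [← hY, List.drop_append_of_le_length (le_of_lt hi)]
        refine hPre (c :: t) (List.suffix_refl _) p hp q (hsub1 q hq)
          (fun h => hqne h.symm) hpre i hipos hi ?_
        rw [hdropX]
        exact hqpre
    have hA2 : pvRep p.1 p.2 (p.1 ++ pvApply l1 Y) = p.2 ++ pvRep p.1 p.2 (pvApply l1 Y) :=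
      pvRep_head_match p.1 p.2 _ hpne
    have hA3 : pvApply l2 (p.2 ++ pvRep p.1 p.2 (pvApply l1 Y)) =
        p.2 ++ pvApply l2 (pvRep p.1 p.2 (pvApply l1 Y)) := by
      refine pvApply_append l2 hsub2 p.2 _ ?_
      intro q hq i hi hqpre
      have hq' : q ∈ pvCTable := hsub2 q hq
      obtain ⟨d, qs, hd⟩ : ∃ d qs, q.1 = d :: qs := by
        cases hqq : q.1 with
        | nil => exact absurd hqq (pvTok_ne_nil q hq')
        | cons d qs => exact ⟨d, qs, rfl⟩
      obtain ⟨e, es, he⟩ : ∃ e es, p.2.drop i = e :: es := by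
        cases hee : p.2.drop i with
        | nil =>
          have : p.2.length - i = 0 := by
            have := congrArg List.length hee
            simpa using this
          omega
        | cons e es => exact ⟨e, es, rfl⟩
      rw [hd, he, List.cons_append, List.cons_prefix_cons] at hqpre
      have hdp2 : d ∈ p.2 := by
        have : d ∈ p.2.drop i := by rw [he, hqpre.1]; exact List.mem_cons_self
        exact List.drop_subset _ _ this
      exact pvChars_disjoint q hq' p hp d (hd ▸ List.mem_cons_self) hdp2
    have hYsuf : Y <:+ (c :: t) := ⟨p.1, hY⟩
    have hIH : pvScan (t.drop (p.1.length - 1)) = pvApply pvCTable (t.drop (p.1.length - 1)) :=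
      ih (by rw [hYdrop]; exact pvPre_suffix hPre hYsuf)
    rw [pvScan, hfind]
    show p.2 ++ pvScan (List.drop (p.1.length - 1) t) = pvApply pvCTable (c :: t)
    rw [hIH, hYdrop]
    rw [htbl, pvApply_decomp, pvApply_decomp, hA1, hA2, hA3]
  | case3 c t hfind ih =>
    intro hPre
    have hnone : ∀ q ∈ pvCTable, ¬ q.1 <+: (c :: t) := by
      intro q hq hqp
      have h1 := List.find?_eq_none.mp hfind q hq
      have h2 := List.isPrefixOf_iff_prefix.mpr hqp
      rw [h2] at h1
      simp at h1
    have hcons : pvApply pvCTable (c :: t) = c :: pvApply pvCTable t := by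
      have h1 : ∀ p ∈ pvCTable, ∀ i < ([c] : List Char).length, ¬ p.1 <+: (List.drop i [c] ++ t) := by
        intro q hq i hi
        have hi0 : i = 0 := by simpa using hi
        subst hi0
        simpa using hnone q hq
      simpa using pvApply_append pvCTable (fun p hp => hp) [c] t h1
    rw [pvScan, hfind]
    show c :: pvScan t = pvApply pvCTable (c :: t)
    rw [hcons, ih (pvPre_suffix hPre (List.suffix_cons c t))]

-- the String-level fold of A, pushed down to character lists
lemma pvA_toList :
    ∀ (tbl : List (String × String)) (t : String),
      (tbl.foldl (fun t p => PySem.Str.replace t p.1 p.2) t).toList =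
        (tbl.map (fun p => (p.1.toList, p.2.toList))).foldl
          (fun s p => PySem.Chars.replace s p.1 p.2) t.toList := by
  intro tbl
  induction tbl with
  | nil => intro t; rfl
  | cons p tbl ih =>
    intro t
    simp only [List.map_cons, List.foldl_cons]
    rw [ih, PySem.Str.toList_replace]

-- ten Chars.replace passes are ten pvRep passes
lemma pvChars_fold_eq_pvApply :
    ∀ (tbl : List (List Char × List Char)), (∀ p ∈ tbl, p.1 ≠ []) →
      ∀ X, tbl.foldl (fun s p => PySem.Chars.replace s p.1 p.2) X = pvApply tbl X := by
  intro tbl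
  induction tbl with
  | nil => intro _ _; rfl
  | cons p tbl ih =>
    intro h X
    simp only [List.foldl_cons]
    rw [pvReplace_eq p.1 p.2 X (h p List.mem_cons_self)]
    exact ih (fun q hq => h q (List.mem_cons_of_mem p hq)) _

-- the stated precondition implies the suffix form
lemma pvPre_of_Pre (text : String) (h : Pre_unmask_list_markers text) : pvPre text.toList := by
  intro s hs p1 hp1 p2 hp2 hne hpre i hipos hilt hcon
  exact h s ((List.mem_tails s _).mpr hs) p1 hp1 p2 hp2 hne
    (List.isPrefixOf_iff_prefix.mpr hpre) i (List.mem_range.mpr hilt) hipos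
    (List.isPrefixOf_iff_prefix.mpr hcon)

-- ===== bridge between B's find-driven scan and the leftmost token scan =====

-- every token is the stem followed by a suffix+'__', and conversely
lemma pvStem_prefix_tok : ∀ p ∈ pvCTable, pvStem <+: p.1 := by decide
lemma pvPair_mem : ∀ s ∈ pvSuffixes, (pvStem ++ (s ++ ['_', '_']), pvMarker s) ∈ pvCTable := by
  decide
lemma pvPair_surj :
    ∀ p ∈ pvCTable, ∃ s ∈ pvSuffixes, p = (pvStem ++ (s ++ ['_', '_']), pvMarker s) := by decide
lemma pvSuffix_excl : ∀ s1 ∈ pvSuffixes, ∀ s2 ∈ pvSuffixes, s1 ≠ s2 →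
    ¬ (s1 ++ ['_', '_']) <+: (s2 ++ ['_', '_']) := by decide

-- at any one position, at most one suffix (hence one token) matches
lemma pvSuffix_unique {r : List Char} {s1 s2 : List Char} (h1 : s1 ∈ pvSuffixes)
    (h2 : s2 ∈ pvSuffixes) (m1 : (s1 ++ ['_', '_']) <+: r) (m2 : (s2 ++ ['_', '_']) <+: r) :
    s1 = s2 := by
  by_contra hne
  rcases List.prefix_or_prefix_of_prefix m1 m2 with hc | hc
  · exact pvSuffix_excl s1 h1 s2 h2 hne hc
  · exact pvSuffix_excl s2 h2 s1 h1 (fun h => hne h.symm) hc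

-- the token find? at a position where the stem matches, determined by the suffix find?
lemma pvFind_some_of_suffix {l r : List Char} (hl : l = pvStem ++ r) {s : List Char}
    (hs : s ∈ pvSuffixes) (hm : (s ++ ['_', '_']) <+: r) :
    pvCTable.find? (fun q => q.1.isPrefixOf l) = some (pvStem ++ (s ++ ['_', '_']), pvMarker s) := by
  have hmem := pvPair_mem s hs
  have hpre : (pvStem ++ (s ++ ['_', '_'])) <+: l := by
    rw [hl]; exact (List.prefix_append_right_inj pvStem).mpr hm
  have hsome : (pvCTable.find? (fun q => q.1.isPrefixOf l)).isSome = true :=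
    List.find?_isSome.mpr ⟨_, hmem, List.isPrefixOf_iff_prefix.mpr hpre⟩
  obtain ⟨q, hfq⟩ := Option.isSome_iff_exists.mp hsome
  have hqmem : q ∈ pvCTable := List.mem_of_find?_eq_some hfq
  have hqb : (fun q : List Char × List Char => q.1.isPrefixOf l) q = true :=
    List.find?_some (p := fun q : List Char × List Char => q.1.isPrefixOf l) hfq
  have hqpre : q.1 <+: l := List.isPrefixOf_iff_prefix.mp hqb
  obtain ⟨s', hs', rfl⟩ := pvPair_surj q hqmem
  have hm' : (s' ++ ['_', '_']) <+: r := by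
    rw [hl] at hqpre
    exact (List.prefix_append_right_inj pvStem).mp hqpre
  rw [pvSuffix_unique hs' hs hm' hm] at hfq
  exact hfq

-- no suffix matches after the stem ⇒ no token matches at all
lemma pvFind_none_of_no_suffix {l r : List Char} (hl : l = pvStem ++ r)
    (h : ∀ s ∈ pvSuffixes, ¬ (s ++ ['_', '_']) <+: r) :
    ∀ p ∈ pvCTable, ¬ p.1 <+: l := by
  intro p hp hpre
  obtain ⟨s, hs, rfl⟩ := pvPair_surj p hp
  refine h s hs ?_
  rw [hl] at hpre
  exact (List.prefix_append_right_inj pvStem).mp hpre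

-- no stem at a position ⇒ no token at that position
lemma pvNoTok_of_noStem {l : List Char} (h : ¬ pvStem <+: l) : ∀ p ∈ pvCTable, ¬ p.1 <+: l := by
  intro p hp hpre
  exact h ((pvStem_prefix_tok p hp).trans hpre)

-- the scan copies any region in which no token starts
lemma pvScan_copy : ∀ (m : Nat) (l : List Char),
    (∀ i < m, ∀ p ∈ pvCTable, ¬ p.1 <+: l.drop i) →
    pvScan l = l.take m ++ pvScan (l.drop m) := by
  intro m
  induction m with
  | zero => intro l _; simp
  | succ n ih =>
    intro l h
    cases l with
    | nil => simp
    | cons c t =>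
      have h0 : pvCTable.find? (fun p => p.1.isPrefixOf (c :: t)) = none := by
        refine List.find?_eq_none.mpr ?_
        intro p hp
        have := h 0 (Nat.succ_pos n) p hp
        simp only [List.drop_zero] at this
        simpa [List.isPrefixOf_iff_prefix] using this
      rw [pvScan, h0]
      have ht : pvScan t = t.take n ++ pvScan (t.drop n) := by
        refine ih t ?_
        intro i hi p hp
        have := h (i + 1) (by omega) p hp
        simpa using this
      show c :: pvScan t = List.take (n + 1) (c :: t) ++ pvScan (List.drop (n + 1) (c :: t))
      rw [ht]
      simp

-- the scan fires the matching token where stem and suffix both match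
lemma pvScan_match {s Y : List Char} (hs : s ∈ pvSuffixes) :
    pvScan (pvStem ++ (s ++ ['_', '_']) ++ Y) = pvMarker s ++ pvScan Y := by
  have hfind : pvCTable.find? (fun q => q.1.isPrefixOf (pvStem ++ (s ++ ['_', '_']) ++ Y)) =
      some (pvStem ++ (s ++ ['_', '_']), pvMarker s) := by
    refine pvFind_some_of_suffix (r := (s ++ ['_', '_']) ++ Y) (by simp) hs ?_
    exact List.prefix_append _ _
  have hl : pvStem ++ (s ++ ['_', '_']) ++ Y =
      '_' :: (pvStem.tail ++ (s ++ ['_', '_']) ++ Y) := by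
    rfl
  rw [hl] at hfind ⊢
  rw [pvScan, hfind]
  show pvMarker s ++
      pvScan (List.drop ((pvStem ++ (s ++ ['_', '_'])).length - 1)
        (pvStem.tail ++ (s ++ ['_', '_']) ++ Y)) = pvMarker s ++ pvScan Y
  congr 1
  have hlen : (pvStem ++ (s ++ ['_', '_'])).length - 1 =
      (pvStem.tail ++ (s ++ ['_', '_'])).length := by
    simp [pvStem]
  rw [hlen, List.drop_left]

-- pvFind facts, via Chars.find_spec
lemma pvFind_stem_at (l : List Char) (h : ¬ PySem.Chars.find l pvStem < 0) :
    pvStem <+: l.drop (PySem.Chars.find l pvStem).toNat :=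
  (PySem.Chars.find_spec (s := l) (sub := pvStem) (by omega)).1

lemma pvFind_stem_before (l : List Char) (h : ¬ PySem.Chars.find l pvStem < 0) :
    ∀ i < (PySem.Chars.find l pvStem).toNat, ¬ pvStem <+: l.drop i :=
  (PySem.Chars.find_spec (s := l) (sub := pvStem) (by omega)).2

lemma pvFind_stem_none (l : List Char) (h : PySem.Chars.find l pvStem < 0) :
    ∀ i, ¬ pvStem <+: l.drop i := by
  intro i hpre
  have hin : PySem.Chars.isIn pvStem l = true :=
    (PySem.Chars.exists_prefix_drop_iff_isIn (sub := pvStem) (s := l)).mp ⟨i, hpre⟩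
  have hinf : pvStem <:+: l := (PySem.Chars.isIn_iff_infix (sub := pvStem) (s := l)).mp hin
  have := (PySem.Chars.find_nonneg_iff (s := l) (sub := pvStem)).mpr hinf
  omega

-- B's find-driven scan equals the leftmost token scan, unconditionally
lemma pvScan2_eq : ∀ l : List Char, pvScan2 l = pvScan l := by
  intro l
  induction l using pvScan2.induct with
  | case1 l hj =>
    rw [pvScan2, dif_pos hj]
    have hnotok : ∀ i < l.length, ∀ p ∈ pvCTable, ¬ p.1 <+: l.drop i := by
      intro i _ p hp
      exact pvNoTok_of_noStem (pvFind_stem_none l hj i) p hp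
    have := pvScan_copy l.length l hnotok
    simp only [List.take_length, List.drop_length] at this
    rw [this, pvScan]
    simp
  | case2 l hj s hfind ih =>
    rw [pvScan2, dif_neg hj, hfind]
    have hstem : pvStem <+: l.drop (PySem.Chars.find l pvStem).toNat := pvFind_stem_at l hj
    have hbefore : ∀ i < (PySem.Chars.find l pvStem).toNat, ¬ pvStem <+: l.drop i :=
      pvFind_stem_before l hj
    have hsmem : s ∈ pvSuffixes := List.mem_of_find?_eq_some hfind
    have hsmb : (fun s : List Char =>
        (s ++ ['_', '_']).isPrefixOf (l.drop ((PySem.Chars.find l pvStem).toNat + 8))) s = true :=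
      List.find?_some (p := fun s : List Char =>
        (s ++ ['_', '_']).isPrefixOf (l.drop ((PySem.Chars.find l pvStem).toNat + 8))) hfind
    have hsm : (s ++ ['_', '_']) <+:
        l.drop ((PySem.Chars.find l pvStem).toNat + 8) :=
      List.isPrefixOf_iff_prefix.mp hsmb
    obtain ⟨r, hr⟩ := hstem
    have hr8 : l.drop ((PySem.Chars.find l pvStem).toNat + 8) = r := by
      have hsplit : l.drop ((PySem.Chars.find l pvStem).toNat + 8) =
          (l.drop (PySem.Chars.find l pvStem).toNat).drop 8 := by
        rw [List.drop_drop, Nat.add_comm]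
      rw [hsplit, ← hr]
      have h8 : (8 : Nat) = pvStem.length := rfl
      rw [h8]
      exact List.drop_left
    obtain ⟨Y, hY⟩ := hsm
    rw [hr8] at hY
    have hcopy : pvScan l =
        l.take (PySem.Chars.find l pvStem).toNat ++
          pvScan (l.drop (PySem.Chars.find l pvStem).toNat) := by
      refine pvScan_copy _ l ?_
      intro i hi p hp
      exact pvNoTok_of_noStem (hbefore i hi) p hp
    have hdropj : l.drop (PySem.Chars.find l pvStem).toNat =
        pvStem ++ (s ++ ['_', '_']) ++ Y := by
      rw [← hr, ← hY]
      simp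
    have hfire : pvScan (l.drop (PySem.Chars.find l pvStem).toNat) =
        pvMarker s ++ pvScan Y := by
      rw [hdropj]; exact pvScan_match hsmem
    have hYeq : (l.drop ((PySem.Chars.find l pvStem).toNat + 8)).drop (s.length + 2) = Y := by
      rw [hr8, ← hY]
      have hl2 : (s ++ ['_', '_']).length = s.length + 2 := by simp
      rw [← hl2, List.drop_left]
    show l.take (PySem.Chars.find l pvStem).toNat ++ pvMarker s ++
        pvScan2 ((l.drop ((PySem.Chars.find l pvStem).toNat + 8)).drop (s.length + 2)) =
      pvScan l
    rw [hcopy, hfire, ih, hYeq]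
    simp
  | case3 l hj hfind ih =>
    rw [pvScan2, dif_neg hj, hfind]
    have hstem : pvStem <+: l.drop (PySem.Chars.find l pvStem).toNat := pvFind_stem_at l hj
    have hbefore : ∀ i < (PySem.Chars.find l pvStem).toNat, ¬ pvStem <+: l.drop i :=
      pvFind_stem_before l hj
    obtain ⟨r, hr⟩ := hstem
    have hr8 : l.drop ((PySem.Chars.find l pvStem).toNat + 8) = r := by
      have hsplit : l.drop ((PySem.Chars.find l pvStem).toNat + 8) =
          (l.drop (PySem.Chars.find l pvStem).toNat).drop 8 := by
        rw [List.drop_drop, Nat.add_comm]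
      rw [hsplit, ← hr]
      have h8 : (8 : Nat) = pvStem.length := rfl
      rw [h8]
      exact List.drop_left
    have hnosuf : ∀ s ∈ pvSuffixes, ¬ (s ++ ['_', '_']) <+: r := by
      intro s hs hpre
      have hnone := List.find?_eq_none.mp hfind s hs
      rw [hr8] at hnone
      exact hnone (List.isPrefixOf_iff_prefix.mpr hpre)
    have hnotok_j : ∀ p ∈ pvCTable, ¬ p.1 <+: l.drop (PySem.Chars.find l pvStem).toNat :=
      pvFind_none_of_no_suffix (by rw [← hr]) hnosuf
    have hcopy : pvScan l =
        l.take ((PySem.Chars.find l pvStem).toNat + 1) ++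
          pvScan (l.drop ((PySem.Chars.find l pvStem).toNat + 1)) := by
      refine pvScan_copy _ l ?_
      intro i hi p hp
      rcases Nat.lt_succ_iff_lt_or_eq.mp hi with hlt | rfl
      · exact pvNoTok_of_noStem (hbefore i hlt) p hp
      · exact hnotok_j p hp
    show l.take ((PySem.Chars.find l pvStem).toNat + 1) ++
        pvScan2 (l.drop ((PySem.Chars.find l pvStem).toNat + 1)) = pvScan l
    rw [hcopy, ih]

-- ===== VERDICT =====
theorem unmask_list_markers_spec : Claim_equal_unmask_list_markers := by
  intro text _hdom hpre
  unfold Spec_unmask_list_markers unmask_list_markers_alt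
  have hA : (unmask_list_markers text).toList = pvApply pvCTable text.toList := by
    rw [unmask_list_markers, pvA_toList]
    exact pvChars_fold_eq_pvApply pvCTable pvTok_ne_nil text.toList
  have hB : pvScan2 text.toList = pvApply pvCTable text.toList := by
    rw [pvScan2_eq]
    exact pvMain text.toList (pvPre_of_Pre text hpre)
  calc unmask_list_markers text
      = String.ofList (unmask_list_markers text).toList := String.ofList_toList.symm
    _ = String.ofList (pvScan2 text.toList) := by rw [hA, hB]
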